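-- pv_equiv track=rewrite | github.com/ZhuoranCool/JSON_WORK | combination/combine.py | update_and_sort_lists
-- ===== SOURCE A (Python) =====
-- def update_and_sort_lists(dealList, originList):
--     resultList = []
--
--     for i in range(len(dealList)):
--         deal_dict = {item["Post"]: item for item in dealList[i]}  # Create a dictionary for quick lookup
--
--         updated_list = []
--         for item in originList[i]:
--             if item["Post"] in deal_dict:
--                 updated_list.append(deal_dict[item["Post"]])  # Replace with dealList item
--             else:
--                 updated_list.append(item)  # Keep the original item
--
--         resultList.append(updated_list)
--
--     return resultList
-- ===== SOURCE B (Python) =====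
-- def update_and_sort_lists(dealList, originList):
--     resultList = []
--     for deal, origin in zip(dealList, originList):
--         index = {}
--         for pos, item in enumerate(origin):
--             index.setdefault(item["Post"], []).append(pos)
--         updated = list(origin)
--         for item in deal:
--             for pos in index.get(item["Post"], []):
--                 updated[pos] = item
--         resultList.append(updated)
--     return resultList
-- ===== Notes on version B (the rewrite author's own statement) =====
-- stated objective: alternative
-- what changed: A builds a Post->item dict from each deal row and rewrites the origin row item by item via membership tests; B instead builds a Post->positions index of the origin row, copies the row, and patches the copy in deal order, iterating over zip(dealList, originList) rather than range indexing.
import Mathlib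
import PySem

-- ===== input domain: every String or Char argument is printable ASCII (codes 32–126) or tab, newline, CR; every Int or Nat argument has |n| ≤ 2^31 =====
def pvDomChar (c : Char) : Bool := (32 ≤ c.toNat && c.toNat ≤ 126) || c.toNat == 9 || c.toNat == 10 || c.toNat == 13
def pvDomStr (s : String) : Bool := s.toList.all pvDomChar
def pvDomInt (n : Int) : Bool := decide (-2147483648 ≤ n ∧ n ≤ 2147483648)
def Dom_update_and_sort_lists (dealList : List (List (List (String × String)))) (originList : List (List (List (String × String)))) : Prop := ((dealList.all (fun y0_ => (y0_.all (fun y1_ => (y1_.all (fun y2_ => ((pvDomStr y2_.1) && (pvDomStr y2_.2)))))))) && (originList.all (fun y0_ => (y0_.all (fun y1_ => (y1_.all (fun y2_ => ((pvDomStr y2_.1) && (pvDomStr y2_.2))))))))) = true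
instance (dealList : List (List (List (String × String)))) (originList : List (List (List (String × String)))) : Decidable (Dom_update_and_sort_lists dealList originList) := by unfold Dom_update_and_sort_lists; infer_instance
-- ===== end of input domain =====

-- B replaces A's per-origin-item membership scan of a deal dictionary by a position index of the
-- origin row (Post -> positions) patched in deal order over a copy of the row; objective: alternative.

-- ===== PORT A =====
-- item["Post"] (first match in the association list, "" never occurs under Pre_)
def pvPostD (it : List (String × String)) : String :=
  ((PySem.Dict.mk it).get? "Post").getD ""

-- the body of A's loop over i: deal_dict comprehension, then the updated_list loop
def pvRowA (deal origin : List (List (String × String))) : List (List (String × String)) :=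
  let deal_dict : PySem.Dict String (List (String × String)) :=
    deal.foldl (fun d item => d.insert (pvPostD item) item) PySem.Dict.empty
  origin.foldl (fun up item =>
      if deal_dict.contains (pvPostD item) then
        up ++ [(deal_dict.get? (pvPostD item)).getD item]
      else
        up ++ [item]) []

def update_and_sort_lists (dealList : List (List (List (String × String)))) (originList : List (List (List (String × String)))) : List (List (List (String × String))) :=
  (PySem.List.pyRange 0 (dealList.length : Int) 1).foldl (fun resultList i =>
    resultList ++ [pvRowA (PySem.List.pyGetD dealList i []) (PySem.List.pyGetD originList i [])]) []

-- ===== PORT B =====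
-- the body of B's loop over zip(dealList, originList): position index, then patch a copy in deal order
def pvRowB (deal origin : List (List (String × String))) : List (List (String × String)) :=
  let index : PySem.Dict String (List Int) :=
    (PySem.List.enumerate origin 0).foldl (fun d q => d.modify (pvPostD q.2) [] (fun l => l ++ [q.1])) PySem.Dict.empty
  deal.foldl (fun up item =>
      (index.getD (pvPostD item) []).foldl (fun up pos => PySem.List.pySetD up pos item) up) origin

def update_and_sort_lists_alt (dealList : List (List (List (String × String)))) (originList : List (List (List (String × String)))) : List (List (List (String × String))) :=
  (dealList.zip originList).foldl (fun resultList pr =>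
    resultList ++ [pvRowB pr.1 pr.2]) []

-- ===== PRECONDITION & SPEC =====
-- Pre_ excludes exactly the inputs where Python A raises: an IndexError when originList is shorter
-- than dealList, and a KeyError when an accessed item lacks the "Post" key.
def Pre_update_and_sort_lists (dealList : List (List (List (String × String)))) (originList : List (List (List (String × String)))) : Prop :=
  dealList.length ≤ originList.length ∧
  dealList.all (fun r => r.all (fun it => ((PySem.Dict.mk it).get? "Post").isSome)) = true ∧
  (originList.take dealList.length).all (fun r => r.all (fun it => ((PySem.Dict.mk it).get? "Post").isSome)) = true
instance (dealList : List (List (List (String × String)))) (originList : List (List (List (String × String)))) : Decidable (Pre_update_and_sort_lists dealList originList) := by unfold Pre_update_and_sort_lists; infer_instance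

def pvWitness_update_and_sort_lists : (List (List (List (String × String)))) × (List (List (List (String × String)))) :=
  ([[[("Post","a"),("v","1")]]], [[[("Post","a"),("v","0")],[("Post","b")]]])

def Spec_update_and_sort_lists (dealList : List (List (List (String × String)))) (originList : List (List (List (String × String)))) (out : List (List (List (String × String)))) : Prop := out = update_and_sort_lists_alt dealList originList
instance (dealList : List (List (List (String × String)))) (originList : List (List (List (String × String)))) (out : List (List (List (String × String)))) : Decidable (Spec_update_and_sort_lists dealList originList out) := by unfold Spec_update_and_sort_lists; infer_instance

-- ===== CLAIM (what is proved, stated in full; the proofs are below) =====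
def Claim_equal_update_and_sort_lists : Prop := ∀ (dealList : List (List (List (String × String)))) (originList : List (List (List (String × String)))), Dom_update_and_sort_lists dealList originList → Pre_update_and_sort_lists dealList originList → Spec_update_and_sort_lists dealList originList (update_and_sort_lists dealList originList)

-- ===== LEMMAS AND PROOFS =====

-- the common row value: each origin item is replaced by the LAST deal item with the same Post
def pvRowSpec (deal origin : List (List (String × String))) : List (List (String × String)) :=
  origin.map (fun x => (deal.reverse.find? (fun it => pvPostD it == pvPostD x)).getD x)

-- A's deal_dict looks up the last matching deal item
lemma pv_get?_foldl_insert (l : List (List (String × String)))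
    (d : PySem.Dict String (List (String × String))) (k : String) :
    (l.foldl (fun d item => d.insert (pvPostD item) item) d).get? k
      = (l.reverse.find? (fun it => pvPostD it == k)).or (d.get? k) := by
  induction l generalizing d with
  | nil => simp
  | cons a l ih =>
    simp only [List.foldl_cons, List.reverse_cons, List.find?_append, ih,
      PySem.Dict.get?_insert]
    cases hf : l.reverse.find? (fun it => pvPostD it == k) with
    | some v => simp
    | none =>
      simp only [Option.none_or, List.find?_singleton]
      by_cases h : pvPostD a = k
      · subst h; simp
      · simp [h, Ne.symm h]

lemma pvRowA_eq (deal origin : List (List (String × String))) :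
    pvRowA deal origin = pvRowSpec deal origin := by
  unfold pvRowA pvRowSpec
  have hget : ∀ k, (deal.foldl (fun d item => d.insert (pvPostD item) item) PySem.Dict.empty).get? k
      = deal.reverse.find? (fun it => pvPostD it == k) := by
    intro k; rw [pv_get?_foldl_insert]; simp
  induction origin using List.reverseRecOn with
  | nil => simp
  | append_singleton o x ih =>
    rw [List.foldl_append, List.foldl_cons, List.foldl_nil, List.map_append, ih]
    rw [PySem.Dict.contains_eq_isSome_get?, hget]
    cases hf : deal.reverse.find? (fun it => pvPostD it == pvPostD x) <;> simp [hf]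

-- B's index lists the positions of a Post in the origin row, in order
lemma pvIndex_getD (origin : List (List (String × String))) (k : String) :
    ((PySem.List.enumerate origin 0).foldl
        (fun d q => d.modify (pvPostD q.2) [] (fun l => l ++ [q.1])) PySem.Dict.empty).getD k []
      = ((PySem.List.enumerate origin 0).filter (fun q => pvPostD q.2 == k)).map (·.1) := by
  have h := PySem.Dict.getD_foldl_modify_append
    ((PySem.List.enumerate origin 0).map (fun q => (pvPostD q.2, q.1)))
    (PySem.Dict.empty : PySem.Dict String (List Int)) k
  rw [List.foldl_map] at h
  simpa [List.filter_map, List.map_map, Function.comp_def] using h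

lemma pv_mem_enumerate (xs : List (List (String × String))) (q : Int × List (String × String)) :
    q ∈ PySem.List.enumerate xs 0 ↔
      ∃ p : Nat, p < xs.length ∧ q.1 = (p : Int) ∧ xs[p]? = some q.2 := by
  rw [List.mem_iff_getElem?]
  constructor
  · rintro ⟨k, hk⟩
    rw [PySem.List.getElem?_enumerate] at hk
    rcases Option.map_eq_some_iff.mp hk with ⟨x, hx, hq⟩
    refine ⟨k, ?_, ?_, ?_⟩
    · exact List.getElem?_eq_some_iff.mp hx |>.1
    · rw [← hq]; simp
    · rw [← hq] at *; simpa using hx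
  · rintro ⟨p, hp, h1, h2⟩
    refine ⟨p, ?_⟩
    rw [PySem.List.getElem?_enumerate, h2]
    simp only [Option.map_some]
    congr 1
    exact Prod.ext (by simpa using h1.symm) rfl

lemma pv_foldl_pySetD_length {α : Type} (ps : List Int) (v : α) (u : List α) :
    (ps.foldl (fun u pos => PySem.List.pySetD u pos v) u).length = u.length := by
  induction ps generalizing u with
  | nil => rfl
  | cons a ps ih => simp [List.foldl_cons, ih, PySem.List.length_pySetD]

lemma pv_foldl_pySetD_getElem? {α : Type} (ps : List Int) (v : α) :
    ∀ (u : List α) (p : Nat), (∀ j ∈ ps, 0 ≤ j) → p < u.length →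
    (ps.foldl (fun u pos => PySem.List.pySetD u pos v) u)[p]?
      = if (p : Int) ∈ ps then some v else u[p]? := by
  induction ps with
  | nil => intro u p _ _; simp
  | cons a ps ih =>
    intro u p h0 hp
    have ha : 0 ≤ a := h0 a (by simp)
    rw [List.foldl_cons, ih _ p (fun j hj => h0 j (by simp [hj]))
      (by rw [PySem.List.length_pySetD]; exact hp)]
    rw [PySem.List.pySetD_of_nonneg _ _ ha, List.getElem?_set]
    by_cases hpa : (p : Int) = a
    · have h1 : a.toNat = p := by omega
      simp [h1, hpa, hp]
    · have h1 : a.toNat ≠ p := by omega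
      simp [h1, hpa]

lemma pv_rowSpec_length (deal origin : List (List (String × String))) :
    (pvRowSpec deal origin).length = origin.length := by
  simp [pvRowSpec]

lemma pvRowB_eq (deal origin : List (List (String × String))) :
    pvRowB deal origin = pvRowSpec deal origin := by
  unfold pvRowB
  induction deal using List.reverseRecOn with
  | nil => simp [pvRowSpec]
  | append_singleton d a ih =>
    rw [List.foldl_append, List.foldl_cons, List.foldl_nil, ih]
    apply List.ext_getElem?
    intro p
    rw [pvIndex_getD]
    have hbound : ∀ j ∈ ((PySem.List.enumerate origin 0).filter
        (fun q => pvPostD q.2 == pvPostD a)).map (·.1), 0 ≤ j := by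
      intro j hj
      rcases List.mem_map.mp hj with ⟨q, hq, hj'⟩
      rcases (pv_mem_enumerate origin q).mp (List.mem_filter.mp hq).1 with ⟨p', _, h1, _⟩
      omega
    by_cases hp : p < origin.length
    · rw [pv_foldl_pySetD_getElem? _ _ _ p hbound (by rw [pv_rowSpec_length]; exact hp)]
      have hmem : ((p : Int) ∈ ((PySem.List.enumerate origin 0).filter
          (fun q => pvPostD q.2 == pvPostD a)).map (·.1)) ↔ pvPostD origin[p] = pvPostD a := by
        constructor
        · intro h
          rcases List.mem_map.mp h with ⟨q, hq, hj'⟩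
          rcases List.mem_filter.mp hq with ⟨hq1, hq2⟩
          rcases (pv_mem_enumerate origin q).mp hq1 with ⟨p', hp', h1, h2⟩
          have : p' = p := by omega
          subst this
          have : origin[p'] = q.2 := by
            have := List.getElem?_eq_getElem hp'
            rw [h2] at this; exact (Option.some_inj.mp this).symm
          rw [this]
          simpa using hq2
        · intro h
          refine List.mem_map.mpr ⟨((p : Int), origin[p]), List.mem_filter.mpr ⟨?_, by simpa using h⟩, rfl⟩
          exact (pv_mem_enumerate origin _).mpr ⟨p, hp, rfl, (List.getElem?_eq_getElem hp)⟩
      rw [pvRowSpec, pvRowSpec, List.getElem?_map, List.getElem?_map,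
        List.getElem?_eq_getElem hp]
      simp only [Option.map_some, List.reverse_append, List.reverse_singleton,
        List.singleton_append]
      cases hcond : (pvPostD a == pvPostD origin[p]) with
      | true =>
        have hin : (p : Int) ∈ _ := hmem.mpr ((eq_of_beq hcond).symm)
        have hfind : List.find? (fun it => pvPostD it == pvPostD origin[p]) (a :: d.reverse)
            = some a := by rw [List.find?_cons]; simp [hcond]
        rw [if_pos hin, hfind]
        simp
      | false =>
        have : ¬ ((p : Int) ∈ ((PySem.List.enumerate origin 0).filter
            (fun q => pvPostD q.2 == pvPostD a)).map (·.1)) := by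
          intro hmem'
          have heq := hmem.mp hmem'
          rw [heq] at hcond
          simp at hcond
        have hfind : List.find? (fun it => pvPostD it == pvPostD origin[p]) (a :: d.reverse)
            = List.find? (fun it => pvPostD it == pvPostD origin[p]) d.reverse := by
          rw [List.find?_cons]; simp [hcond]
        rw [if_neg this, hfind]
    · have h1 : (pvRowSpec (d ++ [a]) origin)[p]? = none := by
        rw [List.getElem?_eq_none_iff]; rw [pv_rowSpec_length]; omega
      have h2 : ((((PySem.List.enumerate origin 0).filter
            (fun q => pvPostD q.2 == pvPostD a)).map (·.1)).foldl
            (fun u pos => PySem.List.pySetD u pos a) (pvRowSpec d origin))[p]? = none := by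
        rw [List.getElem?_eq_none_iff, pv_foldl_pySetD_length, pv_rowSpec_length]; omega
      rw [h1, h2]

lemma pv_top_eq (dealList originList : List (List (List (String × String))))
    (hlen : dealList.length ≤ originList.length) :
    update_and_sort_lists dealList originList = update_and_sort_lists_alt dealList originList := by
  unfold update_and_sort_lists update_and_sort_lists_alt
  rw [PySem.List.pyRange_one, List.foldl_map]
  rw [PySem.List.foldl_append_singleton_eq_map, PySem.List.foldl_append_singleton_eq_map]
  simp only [List.nil_append]
  apply List.ext_getElem
  · simp [hlen]
  · intro i h1 h2
    simp only [List.getElem_map, List.getElem_range, List.getElem_zip]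
    have hi : i < dealList.length := by simpa using h1
    have hi2 : i < originList.length := lt_of_lt_of_le hi hlen
    rw [pvRowA_eq, pvRowB_eq]
    congr 1 <;> simp [PySem.List.pyGetD_natCast, hi, hi2]

-- ===== VERDICT (by name: the statement is the Claim_ definition above) =====
theorem update_and_sort_lists_spec : Claim_equal_update_and_sort_lists := by
  intro dealList originList _ hpre
  exact pv_top_eq dealList originList hpre.1
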